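-- pv_equiv track=rewrite | github.com/Vanja-S/AO-Homeworks | HW1/enron_net_analyser.py | dfs
-- ===== SOURCE A (Python) =====
-- def dfs(start, adj, allowed):
--     visited = set()
--     stack = [start]
--     while stack:
--         v = stack.pop()
--         if v in visited or v not in allowed:
--             continue
--         visited.add(v)
--         for neighbor in adj[v]:
--             if neighbor not in visited and neighbor in allowed:
--                 stack.append(neighbor)
--     return visited
-- ===== SOURCE B (Python) =====
-- def dfs(start, adj, allowed):
--     visited = set()
--
--     def visit(v):
--         if v in visited or v not in allowed:
--             return
--         visited.add(v)
--         # reversed so the visiting order matches the explicit-stack version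
--         for neighbor in reversed(adj[v]):
--             visit(neighbor)
--
--     visit(start)
--     return visited
-- ===== Notes on version B (the rewrite author's own statement) =====
-- stated objective: simpler
-- what changed: The explicit-stack loop with push-time filtering is replaced by a recursive inner helper whose guard does all the filtering; the worklist data structure and the neighbour pre-filter disappear.
import Mathlib
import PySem

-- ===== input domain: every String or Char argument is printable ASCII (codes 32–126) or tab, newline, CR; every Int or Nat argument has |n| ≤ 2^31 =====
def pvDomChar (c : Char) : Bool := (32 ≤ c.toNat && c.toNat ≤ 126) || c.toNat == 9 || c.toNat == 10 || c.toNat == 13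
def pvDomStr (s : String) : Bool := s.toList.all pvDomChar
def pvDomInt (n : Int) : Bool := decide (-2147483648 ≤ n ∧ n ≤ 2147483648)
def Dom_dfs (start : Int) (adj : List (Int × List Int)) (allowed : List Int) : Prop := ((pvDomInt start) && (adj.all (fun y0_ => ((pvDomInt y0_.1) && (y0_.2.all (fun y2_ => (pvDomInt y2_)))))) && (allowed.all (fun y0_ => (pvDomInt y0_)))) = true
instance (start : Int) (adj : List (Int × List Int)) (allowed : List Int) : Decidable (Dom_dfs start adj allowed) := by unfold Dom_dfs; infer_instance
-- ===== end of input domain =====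

-- B replaces A's explicit stack (with its push-time neighbour filter) by a recursive
-- inner helper whose entry guard does all the filtering: simpler decomposition, same cost.
-- Both ports totalize the KeyError of `adj[v]` with `.getD []`; Pre_dfs excludes those inputs.

-- Termination measure shared by both ports: number of allowed values not yet visited.
def dMeas (allowed : List Int) (vis : List Int) : Nat :=
  ((PySem.Set.ofList allowed).toFinset.filter (fun x => x ∉ vis)).card

theorem dMeas_lt (allowed vis : List Int) (v : Int)
    (hv : allowed.contains v = true) (hnv : vis.contains v = false) :
    dMeas allowed (PySem.Set.add vis v) < dMeas allowed vis := by
  have hmem : v ∉ vis := by simpa using hnv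
  have hva : v ∈ allowed := by simpa using hv
  have hadd : PySem.Set.add vis v = vis ++ [v] := by
    simp [PySem.Set.add, PySem.Set.contains, hmem]
  rw [hadd]
  apply Finset.card_lt_card
  refine ⟨fun x hx => ?_, fun hsub => ?_⟩
  · rcases Finset.mem_filter.mp hx with ⟨hx1, hx2⟩
    exact Finset.mem_filter.mpr ⟨hx1, fun hxv => hx2 (List.mem_append.mpr (Or.inl hxv))⟩
  · have hvS : v ∈ (PySem.Set.ofList allowed).toFinset.filter (fun x => x ∉ vis) :=
      Finset.mem_filter.mpr
        ⟨List.mem_toFinset.mpr ((PySem.Set.mem_ofList _ _).mpr hva), hmem⟩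
    have hnot := (Finset.mem_filter.mp (hsub hvS)).2
    exact hnot (List.mem_append.mpr (Or.inr (List.mem_singleton.mpr rfl)))

-- ===== PORT A =====
-- The Python stack is represented top-first: push = cons, pop = head
-- (mirror image of Python's list `append` / `pop()`); `for neighbor in adj[v]`
-- pushes in order, so the foldl-with-cons produces exactly Python's stack.
-- `adj[v]` = first-binding lookup (a Python dict has unique keys); its KeyError
-- case is totalized with `.getD []` and excluded by Pre_dfs.
def dfsLoop (adj : List (Int × List Int)) (allowed : List Int)
    (visited : List Int) (stack : List Int) : List Int :=
  match stack with
  | [] => visited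
  | v :: st =>
    if _h : (visited.contains v || !(allowed.contains v)) = true then
      dfsLoop adj allowed visited st
    else
      let visited' := PySem.Set.add visited v
      let nbrs := (adj.lookup v).getD []
      dfsLoop adj allowed visited'
        (nbrs.foldl (fun s n => if !(visited'.contains n) && allowed.contains n then n :: s else s) st)
  termination_by (dMeas allowed visited, stack.length)
  decreasing_by
  · exact Prod.Lex.right _ (Nat.lt_succ_self _)
  · have h' := Bool.or_eq_false_iff.mp (Bool.eq_false_iff.mpr _h)
    exact Prod.Lex.left _ _
      (dMeas_lt allowed visited v (by simpa using h'.2) h'.1)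

def dfs (start : Int) (adj : List (Int × List Int)) (allowed : List Int) : List Int :=
  dfsLoop adj allowed [] [start]

-- ===== PORT B =====
-- Transliteration of Source B's recursive `visit`; the returned subtype carries the
-- facts (visited is only extended, measure does not grow) needed for termination.
mutual
def dfsVisit (adj : List (Int × List Int)) (allowed : List Int)
    (v : Int) (vis : List Int) :
    {out : List Int // vis <+: out ∧ dMeas allowed out ≤ dMeas allowed vis} :=
  if h : (vis.contains v || !(allowed.contains v)) = true then
    ⟨vis, List.prefix_refl _, le_refl _⟩
  else
    match dfsGo adj allowed ((adj.lookup v).getD []).reverse (PySem.Set.add vis v) with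
    | ⟨out, hpre, hle⟩ =>
      have h' := Bool.or_eq_false_iff.mp (Bool.eq_false_iff.mpr h)
      have hmem : v ∉ vis := by simpa using h'.1
      have hadd : PySem.Set.add vis v = vis ++ [v] := by
        simp [PySem.Set.add, PySem.Set.contains, hmem]
      ⟨out, (hadd ▸ List.prefix_append vis [v]).trans hpre,
        le_of_lt (lt_of_le_of_lt hle (dMeas_lt allowed vis v (by simpa using h'.2) h'.1))⟩
  termination_by (dMeas allowed vis, 0)
  decreasing_by
  · have h' := Bool.or_eq_false_iff.mp (Bool.eq_false_iff.mpr h)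
    exact Prod.Lex.left _ _
      (dMeas_lt allowed vis v (by simpa using h'.2) h'.1)

def dfsGo (adj : List (Int × List Int)) (allowed : List Int)
    (ws : List Int) (vis : List Int) :
    {out : List Int // vis <+: out ∧ dMeas allowed out ≤ dMeas allowed vis} :=
  match ws with
  | [] => ⟨vis, List.prefix_refl _, le_refl _⟩
  | w :: ws' =>
    match dfsVisit adj allowed w vis with
    | ⟨out1, hpre1, hle1⟩ =>
      match dfsGo adj allowed ws' out1 with
      | ⟨out2, hpre2, hle2⟩ => ⟨out2, hpre1.trans hpre2, le_trans hle2 hle1⟩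
  termination_by (dMeas allowed vis, ws.length + 1)
  decreasing_by
  · exact Prod.Lex.right _ (Nat.succ_pos _)
  · rcases lt_or_eq_of_le hle1 with hlt | heq
    · exact Prod.Lex.left _ _ hlt
    · rw [heq]; exact Prod.Lex.right _ (Nat.lt_succ_self _)
end

def dfs_alt (start : Int) (adj : List (Int × List Int)) (allowed : List Int) : List Int :=
  (dfsVisit adj allowed start []).1

-- ===== PRECONDITION & SPEC =====
-- A raises KeyError exactly when some node it visits is missing from adj.  The visited
-- nodes are the allowed nodes graph-reachable from start through edges leaving keyed
-- allowed nodes; `reachSet` is that set as a plain monotone closure (one saturating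
-- expansion per iteration, allowed.length iterations suffice) — a property of the input
-- graph, not a copy of either port's algorithm.
def reachExpand (adj : List (Int × List Int)) (allowed : List Int) (S : List Int) : List Int :=
  PySem.Set.update S (S.flatMap (fun v => ((adj.lookup v).getD []).filter (fun n => allowed.contains n)))

def reachSet (start : Int) (adj : List (Int × List Int)) (allowed : List Int) : List Int :=
  (List.range allowed.length).foldl (fun S _ => reachExpand adj allowed S)
    (if allowed.contains start then [start] else [])

-- A returns normally iff every reachable node has an adjacency entry.
def Pre_dfs (start : Int) (adj : List (Int × List Int)) (allowed : List Int) : Prop :=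
  ((reachSet start adj allowed).all (fun v => (adj.lookup v).isSome)) = true
instance (start : Int) (adj : List (Int × List Int)) (allowed : List Int) : Decidable (Pre_dfs start adj allowed) := by unfold Pre_dfs; infer_instance

def pvWitness_dfs : Int × (List (Int × List Int)) × List Int :=
  (0, [(0, [1, 2]), (1, [2]), (2, [])], [0, 1, 2])

def Spec_dfs (start : Int) (adj : List (Int × List Int)) (allowed : List Int) (out : List Int) : Prop := out = dfs_alt start adj allowed
instance (start : Int) (adj : List (Int × List Int)) (allowed : List Int) (out : List Int) : Decidable (Spec_dfs start adj allowed out) := by unfold Spec_dfs; infer_instance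

-- ===== CLAIM (what is proved, stated in full; the proofs are below) =====
def Claim_equal_dfs : Prop := ∀ (start : Int) (adj : List (Int × List Int)) (allowed : List Int), Dom_dfs start adj allowed → Pre_dfs start adj allowed → Spec_dfs start adj allowed (dfs start adj allowed)

-- ===== LEMMAS AND PROOFS =====

-- Sequentially visiting the stack elements, top first.
def stackRun (adj : List (Int × List Int)) (allowed : List Int)
    (vis : List Int) (st : List Int) : List Int :=
  st.foldl (fun vis v => (dfsVisit adj allowed v vis).1) vis

theorem stackRun_nil (adj : List (Int × List Int)) (allowed vis : List Int) :
    stackRun adj allowed vis [] = vis := rfl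

theorem stackRun_cons (adj : List (Int × List Int)) (allowed vis st : List Int) (v : Int) :
    stackRun adj allowed vis (v :: st)
      = stackRun adj allowed (dfsVisit adj allowed v vis).1 st := rfl

theorem stackRun_append (adj : List (Int × List Int)) (allowed vis s1 s2 : List Int) :
    stackRun adj allowed vis (s1 ++ s2)
      = stackRun adj allowed (stackRun adj allowed vis s1) s2 := by
  simp [stackRun, List.foldl_append]

theorem visit_stop (adj : List (Int × List Int)) (allowed vis : List Int) (v : Int)
    (h : (vis.contains v || !(allowed.contains v)) = true) :
    (dfsVisit adj allowed v vis).1 = vis := by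
  rw [dfsVisit, dif_pos h]

theorem visit_step (adj : List (Int × List Int)) (allowed vis : List Int) (v : Int)
    (h : (vis.contains v || !(allowed.contains v)) = false) :
    (dfsVisit adj allowed v vis).1
      = (dfsGo adj allowed ((adj.lookup v).getD []).reverse (PySem.Set.add vis v)).1 := by
  rw [dfsVisit, dif_neg (ne_true_of_eq_false h)]
  split
  rename_i out hpre hle hgo
  rw [hgo]

theorem go_eq_stackRun (adj : List (Int × List Int)) (allowed : List Int) :
    ∀ (ws vis : List Int), (dfsGo adj allowed ws vis).1 = stackRun adj allowed vis ws := by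
  intro ws
  induction ws with
  | nil => intro vis; rw [dfsGo]; rfl
  | cons w ws ih =>
    intro vis
    rw [dfsGo]
    split
    rename_i out1 hpre1 hle1 h1
    split
    rename_i out2 hpre2 hle2 h2
    have hx := ih out1
    rw [h2] at hx
    rw [stackRun_cons, h1]
    exact hx

theorem visit_prefix (adj : List (Int × List Int)) (allowed vis : List Int) (v : Int) :
    vis <+: (dfsVisit adj allowed v vis).1 := (dfsVisit adj allowed v vis).2.1

-- Neighbours filtered out at push time (already visited, or not allowed) are
-- no-ops when visited recursively later, because visited only grows.
theorem run_filter (adj : List (Int × List Int)) (allowed : List Int) (vis0 : PySem.Set Int) :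
    ∀ (ws vis : List Int), (∀ x ∈ vis0, x ∈ vis) →
      stackRun adj allowed vis (ws.filter (fun n => !(PySem.Set.contains vis0 n) && allowed.contains n))
        = stackRun adj allowed vis ws := by
  intro ws
  induction ws with
  | nil => intro vis _; rfl
  | cons w ws ih =>
    intro vis hsub
    by_cases hp : (!(PySem.Set.contains vis0 w) && allowed.contains w) = true
    · rw [List.filter_cons, if_pos hp, stackRun_cons, stackRun_cons]
      apply ih
      intro x hx
      exact (visit_prefix adj allowed vis w).subset (hsub x hx)
    · have hp' : (!(PySem.Set.contains vis0 w) && allowed.contains w) = false := Bool.eq_false_iff.mpr hp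
      rw [List.filter_cons, if_neg (ne_true_of_eq_false hp'), stackRun_cons]
      have hvw : (dfsVisit adj allowed w vis).1 = vis := by
        rcases Bool.and_eq_false_iff.mp hp' with h | h
        · have hw : w ∈ vis0 := by simpa [PySem.Set.contains] using h
          have hwv : w ∈ vis := hsub w hw
          exact visit_stop adj allowed vis w (by simp [hwv])
        · have hna : w ∉ allowed := by simpa using h
          exact visit_stop adj allowed vis w (by simp [hna])
      rw [hvw]
      exact ih vis hsub

theorem push_foldl (allowed : List Int) (vis' : PySem.Set Int) :
    ∀ (nbrs st : List Int),
      nbrs.foldl (fun s n => if !(PySem.Set.contains vis' n) && allowed.contains n then n :: s else s) st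
        = (nbrs.filter (fun n => !(PySem.Set.contains vis' n) && allowed.contains n)).reverse ++ st := by
  intro nbrs
  induction nbrs with
  | nil => intro st; rfl
  | cons n nbrs ih =>
    intro st
    by_cases hp : (!(PySem.Set.contains vis' n) && allowed.contains n) = true
    · rw [List.foldl_cons, if_pos hp, List.filter_cons, if_pos hp, List.reverse_cons,
        List.append_assoc, List.singleton_append]
      exact ih (n :: st)
    · have hp' : (!(PySem.Set.contains vis' n) && allowed.contains n) = false := Bool.eq_false_iff.mpr hp
      rw [List.foldl_cons, if_neg (ne_true_of_eq_false hp'), List.filter_cons,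
        if_neg (ne_true_of_eq_false hp')]
      exact ih st

theorem loop_eq_stackRun (adj : List (Int × List Int)) (allowed : List Int) :
    ∀ (vis st : List Int), dfsLoop adj allowed vis st = stackRun adj allowed vis st := by
  intro vis st
  fun_induction dfsLoop adj allowed vis st with
  | case1 vis => rfl
  | case2 vis v st hguard ih =>
    rw [stackRun_cons, visit_stop adj allowed vis v hguard]
    exact ih
  | case3 vis v st hguard visited' nbrs ih =>
    have hg : (vis.contains v || !(allowed.contains v)) = false := Bool.eq_false_iff.mpr hguard
    simp only [dite_eq_ite] at ih
    rw [ih, push_foldl, stackRun_append, stackRun_cons,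
      visit_step adj allowed vis v hg, go_eq_stackRun]
    congr 1
    rw [← List.filter_reverse]
    exact run_filter adj allowed visited' nbrs.reverse visited' (fun x hx => hx)

-- ===== VERDICT (by name: the statement is the Claim_ definition above) =====
theorem dfs_spec : Claim_equal_dfs := by
  intro start adj allowed _ _
  unfold Spec_dfs dfs dfs_alt
  rw [loop_eq_stackRun, stackRun_cons, stackRun_nil]
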